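-- pv_equiv track=rewrite | github.com/armandmcqueen/horovod-utils | tig/telegraf_config.py | replace_param_line
-- ===== SOURCE A (Python) =====
-- def replace_param_line(conf_lines, confgroup_str, existing_param_string, new_param_string, keep_old_param_line=False):
--     out_lines = []
--
--     in_correct_confgroup = False
--     for line in conf_lines:
--         l = line.strip()
--         if l == confgroup_str:
--             in_correct_confgroup = True
--
--         if in_correct_confgroup:
--             if l == existing_param_string:
--                 if keep_old_param_line:
--                     out_lines.append(line)
--                 line = line.replace(existing_param_string, new_param_string)
--
--         out_lines.append(line)
--     return out_lines
-- ===== SOURCE B (Python) =====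
-- def replace_param_line(conf_lines, confgroup_str, existing_param_string, new_param_string, keep_old_param_line=False):
--     # Locate the group first, then do one replacement pass over the tail.
--     i = next((j for j, ln in enumerate(conf_lines) if ln.strip() == confgroup_str), None)
--     if i is None:
--         return list(conf_lines)
--     out = list(conf_lines[:i])
--     for line in conf_lines[i:]:
--         if line.strip() == existing_param_string:
--             if keep_old_param_line:
--                 out.append(line)
--             out.append(line.replace(existing_param_string, new_param_string))
--         else:
--             out.append(line)
--     return out
-- ===== Notes on version B (the rewrite author's own statement) =====
-- stated objective: simpler
-- what changed: B first finds the index of the group-header line, copies the prefix verbatim and then does a single replacement pass over the tail, instead of threading an in-group boolean flag through one loop.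
import Mathlib
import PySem

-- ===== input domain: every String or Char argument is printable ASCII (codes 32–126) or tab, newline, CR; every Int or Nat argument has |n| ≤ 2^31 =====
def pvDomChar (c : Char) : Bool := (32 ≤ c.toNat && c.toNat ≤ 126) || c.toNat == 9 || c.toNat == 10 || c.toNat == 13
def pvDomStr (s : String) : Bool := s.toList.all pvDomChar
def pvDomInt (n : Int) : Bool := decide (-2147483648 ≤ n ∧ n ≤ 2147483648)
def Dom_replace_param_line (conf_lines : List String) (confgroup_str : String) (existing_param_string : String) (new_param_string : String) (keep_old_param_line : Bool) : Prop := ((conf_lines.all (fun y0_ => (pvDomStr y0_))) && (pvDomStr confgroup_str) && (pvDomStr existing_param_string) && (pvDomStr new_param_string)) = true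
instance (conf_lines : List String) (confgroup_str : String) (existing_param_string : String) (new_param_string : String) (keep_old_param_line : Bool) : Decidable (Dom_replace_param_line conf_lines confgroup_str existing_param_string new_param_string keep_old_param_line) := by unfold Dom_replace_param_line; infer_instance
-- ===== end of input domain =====

-- ===== PORT A =====
-- B locates the group-header index first, then does one replacement pass over the tail (simpler decomposition; same cost).
def aStep (confgroup_str existing_param_string new_param_string : String) (keep_old_param_line : Bool)
    (st : List String × Bool) (line : String) : List String × Bool :=
  let l := PySem.Str.strip line
  let inGrp := if l == confgroup_str then true else st.2
  if inGrp then
    if l == existing_param_string then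
      ((if keep_old_param_line then st.1 ++ [line] else st.1)
        ++ [PySem.Str.replace line existing_param_string new_param_string], inGrp)
    else (st.1 ++ [line], inGrp)
  else (st.1 ++ [line], inGrp)

def replace_param_line (conf_lines : List String) (confgroup_str : String) (existing_param_string : String) (new_param_string : String) (keep_old_param_line : Bool) : List String :=
  (conf_lines.foldl (aStep confgroup_str existing_param_string new_param_string keep_old_param_line) ([], false)).1

-- ===== PORT B =====
def altTail (existing_param_string new_param_string : String) (keep_old_param_line : Bool) : List String → List String
  | [] => []
  | line :: rest =>
    if PySem.Str.strip line == existing_param_string then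
      (if keep_old_param_line then [line] else [])
        ++ PySem.Str.replace line existing_param_string new_param_string
          :: altTail existing_param_string new_param_string keep_old_param_line rest
    else line :: altTail existing_param_string new_param_string keep_old_param_line rest

def replace_param_line_alt (conf_lines : List String) (confgroup_str : String) (existing_param_string : String) (new_param_string : String) (keep_old_param_line : Bool) : List String :=
  match conf_lines.findIdx? (fun ln => PySem.Str.strip ln == confgroup_str) with
  | none => conf_lines
  | some i => conf_lines.take i ++ altTail existing_param_string new_param_string keep_old_param_line (conf_lines.drop i)

-- ===== PRECONDITION & SPEC =====
def Spec_replace_param_line (conf_lines : List String) (confgroup_str : String) (existing_param_string : String) (new_param_string : String) (keep_old_param_line : Bool) (out : List String) : Prop := out = replace_param_line_alt conf_lines confgroup_str existing_param_string new_param_string keep_old_param_line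
instance (conf_lines : List String) (confgroup_str : String) (existing_param_string : String) (new_param_string : String) (keep_old_param_line : Bool) (out : List String) : Decidable (Spec_replace_param_line conf_lines confgroup_str existing_param_string new_param_string keep_old_param_line out) := by unfold Spec_replace_param_line; infer_instance

-- ===== CLAIM (what is proved, stated in full; the proofs are below) =====
def Claim_equal_replace_param_line : Prop := ∀ (conf_lines : List String) (confgroup_str : String) (existing_param_string : String) (new_param_string : String) (keep_old_param_line : Bool), Dom_replace_param_line conf_lines confgroup_str existing_param_string new_param_string keep_old_param_line → Spec_replace_param_line conf_lines confgroup_str existing_param_string new_param_string keep_old_param_line (replace_param_line conf_lines confgroup_str existing_param_string new_param_string keep_old_param_line)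

-- ===== LEMMAS AND PROOFS =====

-- Once the flag is true, the rest of the fold is exactly the replacement pass.
theorem foldl_flag_true (cg ex new : String) (keep : Bool) :
    ∀ (xs : List String) (acc : List String),
      (xs.foldl (aStep cg ex new keep) (acc, true)).1 = acc ++ altTail ex new keep xs := by
  intro xs
  induction xs with
  | nil => intro acc; simp [altTail]
  | cons line rest ih =>
    intro acc
    by_cases hex : PySem.Str.strip line == ex
    · by_cases hcg : PySem.Str.strip line == cg <;>
        simp [aStep, altTail, hex, hcg, ih] <;> cases keep <;> simp
    · by_cases hcg : PySem.Str.strip line == cg <;>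
        simp [aStep, altTail, hex, hcg, ih]

-- While the flag is false, A scans for the group header; this matches B's findIdx?-then-pass shape.
theorem foldl_flag_false (cg ex new : String) (keep : Bool) :
    ∀ (xs : List String) (acc : List String),
      (xs.foldl (aStep cg ex new keep) (acc, false)).1
        = acc ++ replace_param_line_alt xs cg ex new keep := by
  intro xs
  induction xs with
  | nil => intro acc; simp [replace_param_line_alt]
  | cons line rest ih =>
    intro acc
    by_cases hcg : PySem.Str.strip line == cg
    · have : replace_param_line_alt (line :: rest) cg ex new keep
          = altTail ex new keep (line :: rest) := by
        simp [replace_param_line_alt, List.findIdx?_cons, hcg]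
      rw [this]
      by_cases hex : PySem.Str.strip line == ex <;>
        simp [aStep, altTail, hex, hcg, foldl_flag_true] <;> cases keep <;> simp
    · have hstep : (List.foldl (aStep cg ex new keep) (acc, false) (line :: rest)).1
          = (List.foldl (aStep cg ex new keep) (acc ++ [line], false) rest).1 := by
        by_cases hex : PySem.Str.strip line == ex <;> simp [aStep, hcg, hex]
      rw [hstep, ih]
      unfold replace_param_line_alt
      rw [List.findIdx?_cons]
      simp only [hcg, Bool.false_eq_true, if_false]
      cases hfind : rest.findIdx? (fun ln => PySem.Str.strip ln == cg) with
      | none => simp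
      | some i => simp [List.take_succ_cons, List.drop_succ_cons]

theorem replace_param_line_spec : Claim_equal_replace_param_line := by
  intro conf_lines cg ex new keep _
  unfold Spec_replace_param_line replace_param_line
  simpa using foldl_flag_false cg ex new keep conf_lines []
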